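-- pv_equiv track=rewrite | github.com/nasu314/shogi | shogigame.py | handicap_setup
-- ===== SOURCE A (Python) =====
-- BOARD_SIZE = 9
--
-- class Piece:
--     """軽量な駒表現 (__slots__ でオブジェクト生成・GC負荷を削減)。"""
--     __slots__ = ("kind", "owner")
--     def __init__(self, kind, owner):
--         self.kind = kind
--         self.owner = owner
--
--     def clone(self):
--         # clone が多用される箇所は最適化で極力排除するが、互換性のため残す
--         return Piece(self.kind, self.owner)
--
--     @property
--     def promoted(self):
--         return self.kind.endswith('+')
--
--     def __repr__(self):
--         return f"{self.kind}{'S' if self.owner==0 else 'G'}"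
--
-- def standard_setup():
--     board = [[None for _ in range(BOARD_SIZE)] for __ in range(BOARD_SIZE)]
--     back = ['L', 'N', 'S', 'G', 'K', 'G', 'S', 'N', 'L']
--     for x, k in enumerate(back):
--         board[x][0] = Piece(k, 1)
--     board[1][1], board[7][1] = Piece('R', 1), Piece('B', 1)
--     for x in range(BOARD_SIZE):
--         board[x][2] = Piece('P', 1)
--     for x in range(BOARD_SIZE):
--         board[x][6] = Piece('P', 0)
--     board[1][7], board[7][7] = Piece('B', 0), Piece('R', 0)
--     for x, k in enumerate(back):
--         board[x][8] = Piece(k, 0)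
--     return board
--
-- def handicap_setup(remove_kinds):
--     """指定された種類(kind)の駒を後手(上手 side=1)から取り除く位置リストを返す。
--     remove_kinds: 取り除きたい駒のリスト ['R','B',...] のような形式。
--     戻り値: [(x,y), ...]
--     """
--     positions = []
--     temp = standard_setup()
--     # 指定の種類ごとに盤を走査し最初に見つかった後手駒を除去対象とする
--     for kind in remove_kinds:
--         found = False
--         for x in range(BOARD_SIZE):
--             for y in range(BOARD_SIZE):
--                 p = temp[x][y]
--                 if p and p.owner == 1 and p.kind == kind:
--                     positions.append((x, y))
--                     temp[x][y] = None
--                     found = True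
--                     break
--             if found:
--                 break
--     return positions
-- ===== SOURCE B (Python) =====
-- BOARD_SIZE = 9
--
-- class Piece:
--     __slots__ = ("kind", "owner")
--     def __init__(self, kind, owner):
--         self.kind = kind
--         self.owner = owner
--
-- def standard_setup():
--     board = [[None for _ in range(BOARD_SIZE)] for __ in range(BOARD_SIZE)]
--     back = ['L', 'N', 'S', 'G', 'K', 'G', 'S', 'N', 'L']
--     for x, k in enumerate(back):
--         board[x][0] = Piece(k, 1)
--     board[1][1], board[7][1] = Piece('R', 1), Piece('B', 1)
--     for x in range(BOARD_SIZE):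
--         board[x][2] = Piece('P', 1)
--     for x in range(BOARD_SIZE):
--         board[x][6] = Piece('P', 0)
--     board[1][7], board[7][7] = Piece('B', 0), Piece('R', 0)
--     for x, k in enumerate(back):
--         board[x][8] = Piece(k, 0)
--     return board
--
-- def handicap_setup(remove_kinds):
--     """One board scan builds an index kind -> positions (scan order);
--     each requested kind then pops its first remaining occurrence."""
--     index = {}
--     for x, row in enumerate(standard_setup()):
--         for y, p in enumerate(row):
--             if p and p.owner == 1:
--                 index.setdefault(p.kind, []).append((x, y))
--     positions = []
--     for kind in remove_kinds:
--         lst = index.get(kind)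
--         if lst:
--             positions.append(lst.pop(0))
--     return positions
-- ===== Notes on version B (the rewrite author's own statement) =====
-- stated objective: faster
-- what changed: Instead of rescanning the whole 9x9 board for every requested kind, B scans the board once to build a kind->positions index in scan order and then pops the front entry per requested kind.
import Mathlib
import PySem

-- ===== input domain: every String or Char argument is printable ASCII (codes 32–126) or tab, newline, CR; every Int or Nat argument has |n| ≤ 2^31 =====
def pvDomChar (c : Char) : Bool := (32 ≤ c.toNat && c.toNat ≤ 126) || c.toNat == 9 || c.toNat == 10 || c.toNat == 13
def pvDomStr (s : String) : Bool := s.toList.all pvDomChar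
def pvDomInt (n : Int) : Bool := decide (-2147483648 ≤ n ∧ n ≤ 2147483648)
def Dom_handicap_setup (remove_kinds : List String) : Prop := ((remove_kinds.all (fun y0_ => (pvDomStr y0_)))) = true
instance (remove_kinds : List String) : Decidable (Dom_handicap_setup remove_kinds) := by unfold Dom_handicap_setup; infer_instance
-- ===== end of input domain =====

-- B replaces A's per-kind full-board rescans by one board scan building a kind→positions index,
-- then popping the front entry per requested kind (objective: faster; a timing run measured the speedup).

-- ===== PORT A =====
structure PPiece where
  kind : String
  owner : Int
deriving DecidableEq, Repr

-- board[x][y] = v  (indices always 0..8 and in range here)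
def pvSet2 (b : List (List (Option PPiece))) (x y : Nat) (v : Option PPiece) : List (List (Option PPiece)) :=
  b.set x ((b.getD x []).set y v)

def standard_setup : List (List (Option PPiece)) :=
  let board := List.replicate 9 (List.replicate 9 (none : Option PPiece))
  let back := ["L", "N", "S", "G", "K", "G", "S", "N", "L"]
  let board := (PySem.List.enumerate back).foldl (fun b p => pvSet2 b p.1.toNat 0 (some ⟨p.2, 1⟩)) board
  let board := pvSet2 board 1 1 (some ⟨"R", 1⟩)
  let board := pvSet2 board 7 1 (some ⟨"B", 1⟩)
  let board := (PySem.List.pyRange 0 9 1).foldl (fun b x => pvSet2 b x.toNat 2 (some ⟨"P", 1⟩)) board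
  let board := (PySem.List.pyRange 0 9 1).foldl (fun b x => pvSet2 b x.toNat 6 (some ⟨"P", 0⟩)) board
  let board := pvSet2 board 1 7 (some ⟨"B", 0⟩)
  let board := pvSet2 board 7 7 (some ⟨"R", 0⟩)
  let board := (PySem.List.enumerate back).foldl (fun b p => pvSet2 b p.1.toNat 8 (some ⟨p.2, 0⟩)) board
  board

-- "p and p.owner == 1 and p.kind == kind"
def pvHit (c : Option PPiece) (kind : String) : Bool :=
  match c with
  | some p => p.owner == 1 && p.kind == kind
  | none => false

-- A's inner "for y in range(BOARD_SIZE)" with break: scan the row left to right (y counts the index),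
-- at the first hit blank that cell (temp[x][y] = None) and stop.
def pvScanRow : List (Option PPiece) → String → Nat → Option (Nat × List (Option PPiece))
  | [], _, _ => none
  | c :: cs, kind, y =>
    if pvHit c kind then some (y, none :: cs)
    else
      match pvScanRow cs kind (y + 1) with
      | some (y', cs') => some (y', c :: cs')
      | none => none

-- A's outer "for x in range(BOARD_SIZE)" with the found/break flag: rows in order (x counts the index).
def pvScanBoard : List (List (Option PPiece)) → String → Nat → Option ((Nat × Nat) × List (List (Option PPiece)))
  | [], _, _ => none
  | r :: rs, kind, x =>
    match pvScanRow r kind 0 with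
    | some (y, r') => some ((x, y), r' :: rs)
    | none =>
      match pvScanBoard rs kind (x + 1) with
      | some (p, rs') => some (p, r :: rs')
      | none => none

def handicap_setup (remove_kinds : List String) : List (Int × Int) :=
  let st := remove_kinds.foldl
    (fun (s : List (Int × Int) × List (List (Option PPiece))) kind =>
      match pvScanBoard s.2 kind 0 with
      | some ((x, y), t') => (s.1 ++ [((x : Int), (y : Int))], t')
      | none => s)
    ([], standard_setup)
  st.1

-- ===== PORT B =====
def handicap_setup_alt (remove_kinds : List String) : List (Int × Int) :=
  -- index.setdefault(p.kind, []).append((x, y)) over the enumerated board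
  let index := (PySem.List.enumerate standard_setup).foldl
    (fun d p =>
      (PySem.List.enumerate p.2).foldl
        (fun (d : PySem.Dict String (List (Int × Int))) q =>
          match q.2 with
          | some pc => if pc.owner == 1 then d.modify pc.kind [] (fun l => l ++ [(p.1, q.1)]) else d
          | none => d)
        d)
    PySem.Dict.empty
  -- lst = index.get(kind); if lst: positions.append(lst.pop(0))
  let st := remove_kinds.foldl
    (fun (s : List (Int × Int) × PySem.Dict String (List (Int × Int))) kind =>
      match s.2.get? kind with
      | some (pos :: rest) => (s.1 ++ [pos], s.2.insert kind rest)
      | _ => s)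
    ([], index)
  st.1

-- ===== PRECONDITION & SPEC =====
def Spec_handicap_setup (remove_kinds : List String) (out : List (Int × Int)) : Prop := out = handicap_setup_alt remove_kinds
instance (remove_kinds : List String) (out : List (Int × Int)) : Decidable (Spec_handicap_setup remove_kinds out) := by unfold Spec_handicap_setup; infer_instance

-- ===== CLAIM (what is proved, stated in full; the proofs are below) =====
def Claim_equal_handicap_setup : Prop := ∀ (remove_kinds : List String), Dom_handicap_setup remove_kinds → Spec_handicap_setup remove_kinds (handicap_setup remove_kinds)

-- ===== LEMMAS AND PROOFS =====
-- spec-level view of the board: all owner-1 pieces of a kind, in A's scan order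
def collRow : List (Option PPiece) → String → Nat → List Nat
  | [], _, _ => []
  | c :: cs, k, y => (if pvHit c k then [y] else []) ++ collRow cs k (y + 1)

def coll : List (List (Option PPiece)) → String → Nat → List (Nat × Nat)
  | [], _, _ => []
  | r :: rs, k, x => (collRow r k 0).map (fun y => (x, y)) ++ coll rs k (x + 1)

def pcast (p : Nat × Nat) : Int × Int := ((p.1 : Int), (p.2 : Int))

-- named copies of the two fold bodies (definitionally equal to the ports' lambdas)
def stepA (s : List (Int × Int) × List (List (Option PPiece))) (kind : String) :
    List (Int × Int) × List (List (Option PPiece)) :=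
  match pvScanBoard s.2 kind 0 with
  | some ((x, y), t') => (s.1 ++ [((x : Int), (y : Int))], t')
  | none => s

def stepB (s : List (Int × Int) × PySem.Dict String (List (Int × Int))) (kind : String) :
    List (Int × Int) × PySem.Dict String (List (Int × Int)) :=
  match s.2.get? kind with
  | some (pos :: rest) => (s.1 ++ [pos], s.2.insert kind rest)
  | _ => s

def index0 : PySem.Dict String (List (Int × Int)) :=
  (PySem.List.enumerate standard_setup).foldl
    (fun d p =>
      (PySem.List.enumerate p.2).foldl
        (fun (d : PySem.Dict String (List (Int × Int))) q =>
          match q.2 with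
          | some pc => if pc.owner == 1 then d.modify pc.kind [] (fun l => l ++ [(p.1, q.1)]) else d
          | none => d)
        d)
    PySem.Dict.empty

def InvTD (t : List (List (Option PPiece))) (d : PySem.Dict String (List (Int × Int))) : Prop :=
  ∀ k, d.getD k [] = (coll t k 0).map pcast

theorem scanRow_nil (r : List (Option PPiece)) (k : String) :
    ∀ y0, collRow r k y0 = [] → pvScanRow r k y0 = none := by
  induction r with
  | nil => intro y0 _; rfl
  | cons c cs ih =>
    intro y0 h
    by_cases hp : pvHit c k = true
    · simp [collRow, hp] at h
    · simp [collRow, hp] at h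
      simp [pvScanRow, hp, ih _ h]

theorem scanRow_cons (r : List (Option PPiece)) (k : String) :
    ∀ y0 y rest, collRow r k y0 = y :: rest →
    ∃ r', pvScanRow r k y0 = some (y, r') ∧ collRow r' k y0 = rest ∧
      ∀ k', k' ≠ k → collRow r' k' y0 = collRow r k' y0 := by
  induction r with
  | nil => intro y0 y rest h; simp [collRow] at h
  | cons c cs ih =>
    intro y0 y rest h
    by_cases hp : pvHit c k = true
    · simp [collRow, hp] at h
      obtain ⟨hy, hrest⟩ := h
      refine ⟨none :: cs, by simp [pvScanRow, hp, hy], ?_, ?_⟩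
      · simpa [collRow, pvHit] using hrest
      · intro k' hk'
        have hc : pvHit c k' = false := by
          cases c with
          | none => rfl
          | some p =>
            simp [pvHit] at hp ⊢
            intro _
            rw [hp.2]
            exact fun hh => hk' hh.symm
        have hc0 : pvHit none k' = false := rfl
        simp [collRow, hc, hc0]
    · simp [collRow, hp] at h
      obtain ⟨r', h1, h2, h3⟩ := ih (y0 + 1) y rest h
      refine ⟨c :: r', by simp [pvScanRow, hp, h1], by simp [collRow, hp, h2], ?_⟩
      intro k' hk'
      simp [collRow, h3 k' hk']

theorem scanBoard_nil (b : List (List (Option PPiece))) (k : String) :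
    ∀ x0, coll b k x0 = [] → pvScanBoard b k x0 = none := by
  induction b with
  | nil => intro x0 _; rfl
  | cons r rs ih =>
    intro x0 h
    simp [coll] at h
    obtain ⟨h1, h2⟩ := h
    simp [pvScanBoard, scanRow_nil r k 0 h1, ih _ h2]

theorem scanBoard_cons (b : List (List (Option PPiece))) (k : String) :
    ∀ x0 x y rest, coll b k x0 = (x, y) :: rest →
    ∃ b', pvScanBoard b k x0 = some ((x, y), b') ∧ coll b' k x0 = rest ∧
      ∀ k', k' ≠ k → coll b' k' x0 = coll b k' x0 := by
  induction b with
  | nil => intro x0 x y rest h; simp [coll] at h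
  | cons r rs ih =>
    intro x0 x y rest h
    cases hr : collRow r k 0 with
    | nil =>
      rw [coll, hr] at h
      simp at h
      obtain ⟨rs', h1, h2, h3⟩ := ih (x0 + 1) x y rest h
      refine ⟨r :: rs', by simp [pvScanBoard, scanRow_nil r k 0 hr, h1], ?_, ?_⟩
      · simp [coll, hr, h2]
      · intro k' hk'
        simp [coll, h3 k' hk']
    | cons y1 rest1 =>
      rw [coll, hr] at h
      simp at h
      obtain ⟨⟨hx, hy⟩, hrest⟩ := h
      obtain ⟨r', h1, h2, h3⟩ := scanRow_cons r k 0 y1 rest1 hr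
      refine ⟨r' :: rs, by simp [pvScanBoard, h1, hx, hy], ?_, ?_⟩
      · simp [coll, h2, ← hrest, hx]
      · intro k' hk'
        simp [coll, h3 k' hk']

theorem inv_init : InvTD standard_setup index0 := by
  intro k
  have hb : standard_setup =
      [[some ⟨"L",1⟩, none, some ⟨"P",1⟩, none, none, none, some ⟨"P",0⟩, none, some ⟨"L",0⟩],
       [some ⟨"N",1⟩, some ⟨"R",1⟩, some ⟨"P",1⟩, none, none, none, some ⟨"P",0⟩, some ⟨"B",0⟩, some ⟨"N",0⟩],
       [some ⟨"S",1⟩, none, some ⟨"P",1⟩, none, none, none, some ⟨"P",0⟩, none, some ⟨"S",0⟩],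
       [some ⟨"G",1⟩, none, some ⟨"P",1⟩, none, none, none, some ⟨"P",0⟩, none, some ⟨"G",0⟩],
       [some ⟨"K",1⟩, none, some ⟨"P",1⟩, none, none, none, some ⟨"P",0⟩, none, some ⟨"K",0⟩],
       [some ⟨"G",1⟩, none, some ⟨"P",1⟩, none, none, none, some ⟨"P",0⟩, none, some ⟨"G",0⟩],
       [some ⟨"S",1⟩, none, some ⟨"P",1⟩, none, none, none, some ⟨"P",0⟩, none, some ⟨"S",0⟩],
       [some ⟨"N",1⟩, some ⟨"B",1⟩, some ⟨"P",1⟩, none, none, none, some ⟨"P",0⟩, some ⟨"R",0⟩, some ⟨"N",0⟩],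
       [some ⟨"L",1⟩, none, some ⟨"P",1⟩, none, none, none, some ⟨"P",0⟩, none, some ⟨"L",0⟩]] := by decide
  have hd : index0 = PySem.Dict.mk
      [("L", [(0, 0), (8, 0)]),
       ("P", [(0, 2), (1, 2), (2, 2), (3, 2), (4, 2), (5, 2), (6, 2), (7, 2), (8, 2)]),
       ("N", [(1, 0), (7, 0)]),
       ("R", [(1, 1)]),
       ("S", [(2, 0), (6, 0)]),
       ("G", [(3, 0), (5, 0)]),
       ("K", [(4, 0)]),
       ("B", [(7, 1)])] := by decide
  rw [hb, hd]
  by_cases h1 : k = "L"; · subst h1; decide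
  by_cases h2 : k = "P"; · subst h2; decide
  by_cases h3 : k = "N"; · subst h3; decide
  by_cases h4 : k = "R"; · subst h4; decide
  by_cases h5 : k = "S"; · subst h5; decide
  by_cases h6 : k = "G"; · subst h6; decide
  by_cases h7 : k = "K"; · subst h7; decide
  by_cases h8 : k = "B"; · subst h8; decide
  simp [PySem.Dict.getD_eq_get?_getD, coll, collRow, pvHit,
    Ne.symm h1, Ne.symm h2, Ne.symm h3, Ne.symm h4, Ne.symm h5, Ne.symm h6, Ne.symm h7, Ne.symm h8,
    PySem.Dict.get?]

theorem loop_eq (ks : List String) :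
    ∀ (pos : List (Int × Int)) t d, InvTD t d →
    (ks.foldl stepA (pos, t)).1 = (ks.foldl stepB (pos, d)).1 := by
  induction ks with
  | nil => intro pos t d _; rfl
  | cons k ks ih =>
    intro pos t d hinv
    simp only [List.foldl_cons]
    cases hc : coll t k 0 with
    | nil =>
      have hA : stepA (pos, t) k = (pos, t) := by
        simp [stepA, scanBoard_nil t k 0 hc]
      have hd : d.getD k [] = [] := by rw [hinv k, hc]; rfl
      have hB : stepB (pos, d) k = (pos, d) := by
        rw [PySem.Dict.getD_eq_get?_getD] at hd
        unfold stepB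
        cases hg : d.get? k with
        | none => rfl
        | some v =>
          rw [hg] at hd
          simp at hd
          rw [hd]
      rw [hA, hB]
      exact ih pos t d hinv
    | cons p rest =>
      obtain ⟨x, y⟩ := p
      obtain ⟨t', hsA, hcA, hpres⟩ := scanBoard_cons t k 0 x y rest hc
      have hA : stepA (pos, t) k = (pos ++ [pcast (x, y)], t') := by
        simp [stepA, hsA, pcast]
      have hg : d.get? k = some (pcast (x, y) :: rest.map pcast) := by
        have h2 := hinv k
        rw [hc, PySem.Dict.getD_eq_get?_getD] at h2
        cases hgg : d.get? k with
        | none => rw [hgg] at h2; simp at h2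
        | some v => rw [hgg] at h2; simp at h2; rw [h2]
      have hB : stepB (pos, d) k = (pos ++ [pcast (x, y)], d.insert k (rest.map pcast)) := by
        simp [stepB, hg]
      rw [hA, hB]
      apply ih
      intro k'
      by_cases hk : k' = k
      · subst hk
        rw [PySem.Dict.getD_insert_self, hcA]
      · rw [PySem.Dict.getD_insert, if_neg hk, hinv k', hpres k' hk]

-- ===== VERDICT (by name: the statement is the Claim_ definition above) =====
theorem handicap_setup_spec : Claim_equal_handicap_setup := by
  intro rk _
  unfold Spec_handicap_setup
  show (rk.foldl stepA ([], standard_setup)).1 = (rk.foldl stepB ([], index0)).1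
  exact loop_eq rk [] standard_setup index0 inv_init
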